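-- pv_equiv track=rewrite | github.com/ThemSo/Project-1ADS | pentagoGUI.py | victory_diagonal2
-- ===== SOURCE A (Python) =====
-- def victory_diagonal2(n, l, p, j):
--     for i in range(n * 2):
--         x, y, v = i, n - 1, 0
--         while x >= 0 and y >= 0:
--             if n > y >= 0 and n > x >= 0:
--                 if l[y][x] == j:
--                     v += 1
--                 else:
--                     v = 0
--                 if v >= p:
--                     return True
--             x -= 1
--             y -= 1
--     return False
-- ===== SOURCE B (Python) =====
-- def victory_diagonal2(n, l, p, j):
--     if n <= 0:
--         return False
--     if p <= 0:
--         return True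
--     return any(
--         all(l[y + k][x + k] == j for k in range(p))
--         for y in range(n - p + 1)
--         for x in range(n - p + 1)
--     )
-- ===== Notes on version B (the rewrite author's own statement) =====
-- stated objective: alternative
-- what changed: Replaces A's walk along each of the 2n anti-to-main diagonals with a run counter by a direct brute-force search over all length-p diagonal windows (any/all comprehension over window start positions).
-- outside the precondition, e.g. on victory_diagonal2(2, [[5], [1, 1]], 1, 1): A returns True, B raises IndexError
import Mathlib
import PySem

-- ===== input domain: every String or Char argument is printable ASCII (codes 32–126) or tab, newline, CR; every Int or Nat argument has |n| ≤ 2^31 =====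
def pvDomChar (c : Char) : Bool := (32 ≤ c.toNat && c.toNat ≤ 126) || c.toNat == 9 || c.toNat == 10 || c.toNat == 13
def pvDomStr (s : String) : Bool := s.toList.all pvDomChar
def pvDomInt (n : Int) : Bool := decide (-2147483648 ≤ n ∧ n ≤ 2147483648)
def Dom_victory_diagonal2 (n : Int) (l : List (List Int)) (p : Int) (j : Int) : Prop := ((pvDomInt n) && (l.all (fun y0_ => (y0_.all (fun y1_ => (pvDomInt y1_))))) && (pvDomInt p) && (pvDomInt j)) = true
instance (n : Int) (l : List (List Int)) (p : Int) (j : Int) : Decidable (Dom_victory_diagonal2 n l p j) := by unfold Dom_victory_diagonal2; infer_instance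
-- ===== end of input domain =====

-- B replaces A's per-diagonal run-counter walk by a brute-force search over all
-- length-p diagonal windows (alternative algorithm, not faster).

-- l[y][x]; exact under Pre_ (the index is then always in range)
def pvCell (l : List (List Int)) (y x : Int) : Int :=
  PySem.List.pyGetD (PySem.List.pyGetD l y []) x 0

-- ===== PORT A =====
-- the `while x >= 0 and y >= 0` loop, state (x, y, v)
def victoryDiagWalk (n : Int) (l : List (List Int)) (p j : Int) (x y v : Int) : Bool :=
  if _h : 0 ≤ x ∧ 0 ≤ y then
    if 0 ≤ y ∧ y < n ∧ 0 ≤ x ∧ x < n then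
      let v' := if pvCell l y x = j then v + 1 else 0
      if p ≤ v' then true
      else victoryDiagWalk n l p j (x - 1) (y - 1) v'
    else victoryDiagWalk n l p j (x - 1) (y - 1) v
  else false
termination_by (y + 1).toNat
decreasing_by all_goals omega

def victory_diagonal2 (n : Int) (l : List (List Int)) (p : Int) (j : Int) : Bool :=
  (PySem.List.pyRange 0 (n * 2) 1).any (fun i => victoryDiagWalk n l p j i (n - 1) 0)

-- ===== PORT B =====
def victory_diagonal2_alt (n : Int) (l : List (List Int)) (p : Int) (j : Int) : Bool :=
  if n ≤ 0 then false
  else if p ≤ 0 then true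
  else (PySem.List.pyRange 0 (n - p + 1) 1).any (fun y =>
    (PySem.List.pyRange 0 (n - p + 1) 1).any (fun x =>
      (PySem.List.pyRange 0 p 1).all (fun k => pvCell l (y + k) (x + k) == j)))

-- ===== PRECONDITION & SPEC =====
-- Pre_ excludes boards too small for n (Python IndexError in A on most of them; on
-- the rest A happens to return True before reaching a missing cell while B raises).
def Pre_victory_diagonal2 (n : Int) (l : List (List Int)) (p : Int) (j : Int) : Prop :=
  n ≤ 0 ∨ (n ≤ (l.length : Int) ∧ ∀ r ∈ l.take n.toNat, n ≤ (r.length : Int))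

instance (n : Int) (l : List (List Int)) (p : Int) (j : Int) : Decidable (Pre_victory_diagonal2 n l p j) := by
  unfold Pre_victory_diagonal2; infer_instance

def pvWitness_victory_diagonal2 : Int × List (List Int) × Int × Int := (2, [[1, 0], [0, 1]], 2, 1)

def Spec_victory_diagonal2 (n : Int) (l : List (List Int)) (p : Int) (j : Int) (out : Bool) : Prop := out = victory_diagonal2_alt n l p j
instance (n : Int) (l : List (List Int)) (p : Int) (j : Int) (out : Bool) : Decidable (Spec_victory_diagonal2 n l p j out) := by unfold Spec_victory_diagonal2; infer_instance

-- ===== CLAIM (what is proved, stated in full; the proofs are below) =====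
def Claim_equal_victory_diagonal2 : Prop := ∀ (n : Int) (l : List (List Int)) (p : Int) (j : Int), Dom_victory_diagonal2 n l p j → Pre_victory_diagonal2 n l p j → Spec_victory_diagonal2 n l p j (victory_diagonal2 n l p j)

-- ===== LEMMAS AND PROOFS =====

-- length of the run of j's on the diagonal starting at (x, y), going up-right
def runUR (n : Int) (l : List (List Int)) (j : Int) (x y : Int) : Int :=
  if _h : 0 ≤ x ∧ x < n ∧ 0 ≤ y ∧ y < n then
    if pvCell l y x = j then runUR n l j (x + 1) (y + 1) + 1 else 0
  else 0
termination_by (n - y).toNat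
decreasing_by omega

theorem runUR_nonneg (n : Int) (l : List (List Int)) (j : Int) (x y : Int) :
    0 ≤ runUR n l j x y := by
  fun_induction runUR with
  | case1 x y h hv ih => omega
  | case2 x y h hv => simp
  | case3 x y h => simp

theorem runUR_oob (n : Int) (l : List (List Int)) (j : Int) (x y : Int)
    (h : ¬ (0 ≤ x ∧ x < n ∧ 0 ≤ y ∧ y < n)) : runUR n l j x y = 0 := by
  rw [runUR, dif_neg h]

theorem runUR_ge_iff (n : Int) (l : List (List Int)) (j : Int) (m : Nat) :
    ∀ x y : Int, ((m : Int) ≤ runUR n l j x y ↔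
      ∀ k : Nat, k < m → (0 ≤ x + k ∧ x + k < n ∧ 0 ≤ y + k ∧ y + k < n) ∧
        pvCell l (y + k) (x + k) = j) := by
  induction m with
  | zero =>
    intro x y
    simp [runUR_nonneg]
  | succ m ih =>
    intro x y
    rw [runUR]
    by_cases h : 0 ≤ x ∧ x < n ∧ 0 ≤ y ∧ y < n
    · rw [dif_pos h]
      by_cases hv : pvCell l y x = j
      · rw [if_pos hv]
        constructor
        · intro hle k hk
          rcases Nat.eq_zero_or_pos k with rfl | hpos
          · simpa using ⟨h, hv⟩
          · obtain ⟨k', rfl⟩ : ∃ k', k = k' + 1 := ⟨k - 1, by omega⟩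
            have := (ih (x + 1) (y + 1)).mp (by omega) k' (by omega)
            obtain ⟨hb', hv'⟩ := this
            constructor
            · push_cast; push_cast at hb'; omega
            · convert hv' using 2 <;> push_cast <;> omega
        · intro hall
          have : (m : Int) ≤ runUR n l j (x + 1) (y + 1) := by
            rw [ih]
            intro k hk
            have := hall (k + 1) (by omega)
            push_cast at this ⊢
            constructor
            · omega
            · have := this.2
              convert this using 2 <;> push_cast <;> omega
          omega
      · rw [if_neg hv]
        constructor
        · intro hle; omega
        · intro hall
          exact absurd ((hall 0 (by omega)).2) (by simpa using hv)
    · rw [dif_neg h]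
      constructor
      · intro hle; omega
      · intro hall
        have := (hall 0 (by omega)).1
        simp at this
        omega

theorem walk_iff (n : Int) (l : List (List Int)) (p j : Int) :
    ∀ (N : Nat) (x y : Int), (y + 1).toNat ≤ N →
      (victoryDiagWalk n l p j x y (runUR n l j (x + 1) (y + 1)) = true ↔
        ∃ t : Int, 0 ≤ t ∧ (0 ≤ y - t ∧ y - t < n ∧ 0 ≤ x - t ∧ x - t < n) ∧
          p ≤ runUR n l j (x - t) (y - t)) := by
  intro N
  induction N with
  | zero =>
    intro x y hN
    rw [victoryDiagWalk, dif_neg (show ¬ (0 ≤ x ∧ 0 ≤ y) by omega)]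
    simp only [Bool.false_eq_true, false_iff]
    rintro ⟨t, ht, ⟨h1, _, _, _⟩, _⟩
    omega
  | succ N ih =>
    intro x y hN
    by_cases hxy : 0 ≤ x ∧ 0 ≤ y
    · rw [victoryDiagWalk, dif_pos hxy]
      by_cases hg : 0 ≤ y ∧ y < n ∧ 0 ≤ x ∧ x < n
      · rw [if_pos hg]
        have hrun : (if pvCell l y x = j then runUR n l j (x + 1) (y + 1) + 1 else 0)
            = runUR n l j x y := by
          conv_rhs => rw [runUR]
          rw [dif_pos (show 0 ≤ x ∧ x < n ∧ 0 ≤ y ∧ y < n by omega)]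
        simp only [hrun]
        by_cases hp : p ≤ runUR n l j x y
        · rw [if_pos hp]
          constructor
          · intro _
            exact ⟨0, le_refl 0, ⟨by omega, by omega, by omega, by omega⟩, by simpa using hp⟩
          · intro _; rfl
        · rw [if_neg hp]
          rw [show runUR n l j x y = runUR n l j (x - 1 + 1) (y - 1 + 1) by norm_num]
          rw [ih (x - 1) (y - 1) (by omega)]
          constructor
          · rintro ⟨t, ht, ⟨h1, h2, h3, h4⟩, hr⟩
            refine ⟨t + 1, by omega, ⟨by omega, by omega, by omega, by omega⟩, ?_⟩
            convert hr using 2 <;> ring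
          · rintro ⟨t, ht, ⟨h1, h2, h3, h4⟩, hr⟩
            have htpos : 0 < t := by
              by_contra h'
              have ht0 : t = 0 := by omega
              subst ht0
              simp only [sub_zero] at hr
              exact hp hr
            refine ⟨t - 1, by omega, ⟨by omega, by omega, by omega, by omega⟩, ?_⟩
            convert hr using 2 <;> ring
      · rw [if_neg hg]
        have h0 : runUR n l j (x + 1) (y + 1) = 0 := runUR_oob _ _ _ _ _ (by omega)
        have h0' : runUR n l j (x - 1 + 1) (y - 1 + 1) = 0 :=
          runUR_oob _ _ _ _ _ (by omega)
        rw [show runUR n l j (x + 1) (y + 1) = runUR n l j (x - 1 + 1) (y - 1 + 1) by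
          rw [h0, h0']]
        rw [ih (x - 1) (y - 1) (by omega)]
        constructor
        · rintro ⟨t, ht, ⟨h1, h2, h3, h4⟩, hr⟩
          refine ⟨t + 1, by omega, ⟨by omega, by omega, by omega, by omega⟩, ?_⟩
          convert hr using 2 <;> ring
        · rintro ⟨t, ht, ⟨h1, h2, h3, h4⟩, hr⟩
          have htpos : 0 < t := by omega
          refine ⟨t - 1, by omega, ⟨by omega, by omega, by omega, by omega⟩, ?_⟩
          convert hr using 2 <;> ring
    · rw [victoryDiagWalk, dif_neg hxy]
      simp only [Bool.false_eq_true, false_iff]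
      rintro ⟨t, ht, ⟨h1, _, h3, _⟩, _⟩
      omega

theorem A_iff (n : Int) (l : List (List Int)) (p j : Int) :
    victory_diagonal2 n l p j = true ↔
      ∃ x y : Int, (0 ≤ y ∧ y < n ∧ 0 ≤ x ∧ x < n) ∧ p ≤ runUR n l j x y := by
  unfold victory_diagonal2
  rw [List.any_eq_true]
  constructor
  · rintro ⟨i, hi, hwalk⟩
    rw [PySem.List.mem_pyRange_one] at hi
    have h0 : (0 : Int) = runUR n l j (i + 1) (n - 1 + 1) := by
      rw [show n - 1 + 1 = n by omega]
      exact (runUR_oob n l j (i + 1) n (by omega)).symm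
    rw [h0] at hwalk
    rw [walk_iff n l p j (n - 1 + 1).toNat i (n - 1) (le_refl _)] at hwalk
    obtain ⟨t, ht, hb, hr⟩ := hwalk
    exact ⟨i - t, n - 1 - t, ⟨by omega, by omega, by omega, by omega⟩, hr⟩
  · rintro ⟨x, y, hb, hr⟩
    refine ⟨x + (n - 1 - y), ?_, ?_⟩
    · rw [PySem.List.mem_pyRange_one]; omega
    · have h0 : (0 : Int) = runUR n l j (x + (n - 1 - y) + 1) (n - 1 + 1) := by
        rw [show n - 1 + 1 = n by omega]
        exact (runUR_oob n l j _ n (by omega)).symm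
      rw [h0]
      rw [walk_iff n l p j (n - 1 + 1).toNat (x + (n - 1 - y)) (n - 1) (le_refl _)]
      refine ⟨n - 1 - y, by omega, ⟨by omega, by omega, by omega, by omega⟩, ?_⟩
      convert hr using 2 <;> omega

theorem B_iff (n : Int) (l : List (List Int)) (p j : Int) (hn : ¬ n ≤ 0) (hp : ¬ p ≤ 0) :
    victory_diagonal2_alt n l p j = true ↔
      ∃ x y : Int, (0 ≤ y ∧ y ≤ n - p ∧ 0 ≤ x ∧ x ≤ n - p) ∧
        ∀ k : Int, 0 ≤ k → k < p → pvCell l (y + k) (x + k) = j := by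
  unfold victory_diagonal2_alt
  rw [if_neg hn, if_neg hp]
  rw [List.any_eq_true]
  constructor
  · rintro ⟨y, hy, hrest⟩
    rw [PySem.List.mem_pyRange_one] at hy
    rw [List.any_eq_true] at hrest
    obtain ⟨x, hx, hall⟩ := hrest
    rw [PySem.List.mem_pyRange_one] at hx
    rw [List.all_eq_true] at hall
    refine ⟨x, y, ⟨by omega, by omega, by omega, by omega⟩, ?_⟩
    intro k hk0 hkp
    have := hall k (by rw [PySem.List.mem_pyRange_one]; omega)
    simpa using this
  · rintro ⟨x, y, hb, hall⟩
    refine ⟨y, by rw [PySem.List.mem_pyRange_one]; omega, ?_⟩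
    rw [List.any_eq_true]
    refine ⟨x, by rw [PySem.List.mem_pyRange_one]; omega, ?_⟩
    rw [List.all_eq_true]
    intro k hk
    rw [PySem.List.mem_pyRange_one] at hk
    simpa using hall k hk.1 hk.2

-- ===== VERDICT (by name: the statement is the Claim_ definition above) =====
theorem victory_diagonal2_spec : Claim_equal_victory_diagonal2 := by
  intro n l p j _hdom _hpre
  unfold Spec_victory_diagonal2
  by_cases hn : n ≤ 0
  · have hA : victory_diagonal2 n l p j = false := by
      rw [Bool.eq_false_iff]
      intro h
      rw [A_iff] at h
      obtain ⟨x, y, hb, _⟩ := h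
      omega
    rw [hA]
    unfold victory_diagonal2_alt
    rw [if_pos hn]
  · by_cases hp : p ≤ 0
    · have hB : victory_diagonal2_alt n l p j = true := by
        unfold victory_diagonal2_alt
        rw [if_neg hn, if_pos hp]
      have hA : victory_diagonal2 n l p j = true := by
        rw [A_iff]
        refine ⟨0, 0, ⟨by omega, by omega, by omega, by omega⟩, ?_⟩
        have := runUR_nonneg n l j 0 0
        omega
      rw [hA, hB]
    · -- 1 ≤ p
      have hcast : ((p.toNat : Int)) = p := by omega
      rw [Bool.eq_iff_iff]
      rw [A_iff, B_iff n l p j hn hp]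
      constructor
      · rintro ⟨x, y, hb, hr⟩
        rw [← hcast, runUR_ge_iff] at hr
        have hlast := hr (p.toNat - 1) (by omega)
        refine ⟨x, y, ⟨by omega, by omega, by omega, by omega⟩, ?_⟩
        intro k hk0 hkp
        have := (hr k.toNat (by omega)).2
        convert this using 3 <;> omega
      · rintro ⟨x, y, hb, hall⟩
        refine ⟨x, y, ⟨by omega, by omega, by omega, by omega⟩, ?_⟩
        rw [← hcast, runUR_ge_iff]
        intro k hk
        constructor
        · constructor <;> [omega; constructor <;> [omega; constructor <;> omega]]
        · exact hall k (by omega) (by omega)
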